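-- pv_equiv track=rewrite | github.com/jason11501/AI-project01 | CryptarithmeticAlgorithm/CryptarithmeticAlgorithm/CryptarithmeticProblem.py | count_for_len_val
-- ===== SOURCE A (Python) =====
-- def count_for_len_val(stringList):
--     count = 0
--     count_loop = 0
--     count_mul = 0
--     flag = False
--     for i in range(len(stringList)):
--         if '(' in stringList[i]:
--             if '*' in stringList[i]:
--                 count_mul += 1
--             flag = True
--             count_par = 1
--             count_loop += 1
--             for j in range(i+1, len(stringList)):
--                 count_par += 1
--                 if ')' in stringList[j]:
--                     break
--             count += count_par
--         if '*' in stringList[i]: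
--             if not flag:
--                 count_mul += 1
--         if ')' in stringList[i]:
--             flag = False
--
--     count += count_mul
--
--     return len(stringList) - count + count_loop + 1
-- ===== SOURCE B (Python) =====
-- def count_for_len_val(stringList):
--     # One backward pass precomputes, for each suffix start k, the inner-scan
--     # length that would be recomputed per '(' token; one forward pass then folds
--     # everything into a single running total.
--     n = len(stringList)
--     nc = [1] * (n + 1)  # nc[k] = count_par value for an open just before index k
--     for k in range(n - 1, -1, -1):
--         nc[k] = 2 if ')' in stringList[k] else nc[k + 1] + 1
--     total = n + 1
--     flag = False
--     for i, tok in enumerate(stringList):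
--         has_open = '(' in tok
--         has_mul = '*' in tok
--         if has_open:
--             total += 1 - nc[i + 1]
--             if has_mul:
--                 total -= 1
--             flag = True
--         elif has_mul and not flag:
--             total -= 1
--         if ')' in tok:
--             flag = False
--     return total
-- ===== Notes on version B (the rewrite author's own statement) =====
-- stated objective: alternative
-- what changed: Replaces A's per-'(' inner forward rescan for the next ')' by a single backward pass precomputing those scan lengths, and folds A's four counters into one running total in a single forward pass.
import Mathlib
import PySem

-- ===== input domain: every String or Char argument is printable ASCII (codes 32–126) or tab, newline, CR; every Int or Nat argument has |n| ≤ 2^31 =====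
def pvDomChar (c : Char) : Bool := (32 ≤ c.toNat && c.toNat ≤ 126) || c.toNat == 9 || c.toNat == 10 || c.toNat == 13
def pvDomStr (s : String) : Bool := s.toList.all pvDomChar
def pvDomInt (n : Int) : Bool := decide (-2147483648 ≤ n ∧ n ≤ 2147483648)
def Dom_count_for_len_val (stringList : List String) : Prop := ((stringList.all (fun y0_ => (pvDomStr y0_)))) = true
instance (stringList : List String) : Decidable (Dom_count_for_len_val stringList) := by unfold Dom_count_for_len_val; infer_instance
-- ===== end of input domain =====

-- B replaces A's per-'(' inner scan for the next ')' by one backward precomputation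
-- pass plus a single forward pass folding A's four counters into one running total.

-- ===== PORT A =====
-- inner loop 'for j in range(i+1, len)': structural recursion over the suffix after i
def pvInnerA : List String → Int → Int
  | [], count_par => count_par
  | s :: rest, count_par =>
      let count_par := count_par + 1
      if PySem.Str.isIn ")" s then count_par else pvInnerA rest count_par

-- outer loop: state (count, count_loop, count_mul, flag)
def pvLoopA : List String → Int × Int × Int × Bool → Int × Int × Int × Bool
  | [], st => st
  | s :: rest, (count, count_loop, count_mul, flag) =>
      let (count, count_loop, count_mul, flag) :=
        if PySem.Str.isIn "(" s then
          (count + pvInnerA rest 1, count_loop + 1,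
           (if PySem.Str.isIn "*" s then count_mul + 1 else count_mul), true)
        else (count, count_loop, count_mul, flag)
      let count_mul := if PySem.Str.isIn "*" s ∧ flag = false then count_mul + 1 else count_mul
      let flag := if PySem.Str.isIn ")" s then false else flag
      pvLoopA rest (count, count_loop, count_mul, flag)

def count_for_len_val (stringList : List String) : Int :=
  let (count, count_loop, count_mul, _) := pvLoopA stringList (0, 0, 0, false)
  let count := count + count_mul
  (stringList.length : Int) - count + count_loop + 1

-- ===== PORT B =====
-- backward pass of Source B: pvNc xs = the list nc over suffix starts (length n+1, last = 1)
def pvNc : List String → List Int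
  | [] => [1]
  | s :: rest =>
      let t := pvNc rest
      (if PySem.Str.isIn ")" s then 2 else t.headD 1 + 1) :: t

-- forward pass: at token i, nc carries the nc-values from index i+1 on
def pvLoopB : List String → List Int → Bool → Int → Int
  | [], _, _, total => total
  | s :: rest, nc, flag, total =>
      let hasOpen := PySem.Str.isIn "(" s
      let hasMul := PySem.Str.isIn "*" s
      let total :=
        if hasOpen then
          total + 1 - nc.headD 1 - (if hasMul then 1 else 0)
        else if hasMul ∧ flag = false then total - 1 else total
      let flag := if hasOpen then true else flag
      let flag := if PySem.Str.isIn ")" s then false else flag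
      pvLoopB rest nc.tail flag total

def count_for_len_val_alt (stringList : List String) : Int :=
  pvLoopB stringList (pvNc stringList).tail false ((stringList.length : Int) + 1)

-- ===== PRECONDITION & SPEC =====
def Spec_count_for_len_val (stringList : List String) (out : Int) : Prop := out = count_for_len_val_alt stringList
instance (stringList : List String) (out : Int) : Decidable (Spec_count_for_len_val stringList out) := by unfold Spec_count_for_len_val; infer_instance

-- ===== CLAIM (what is proved, stated in full; the proofs are below) =====
def Claim_equal_count_for_len_val : Prop := ∀ (stringList : List String), Dom_count_for_len_val stringList → Spec_count_for_len_val stringList (count_for_len_val stringList)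

-- ===== LEMMAS AND PROOFS =====

-- A's inner scan equals the precomputed head of pvNc
theorem pvInnerA_eq_nc (xs : List String) : ∀ acc : Int, pvInnerA xs acc = acc - 1 + (pvNc xs).headD 1 := by
  induction xs with
  | nil => intro acc; simp [pvInnerA, pvNc]
  | cons s rest ih =>
      intro acc
      simp only [pvInnerA, pvNc]
      split
      · simp only [List.headD_cons]; omega
      · rw [ih]
        simp only [List.headD_cons]
        ring

-- pvLoopA's numeric state is translation-invariant
theorem pvLoopA_shift (xs : List String) : ∀ (c l m : Int) (flag : Bool),
    pvLoopA xs (c, l, m, flag) =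
      ((pvLoopA xs (0, 0, 0, flag)).1 + c, (pvLoopA xs (0, 0, 0, flag)).2.1 + l,
       (pvLoopA xs (0, 0, 0, flag)).2.2.1 + m, (pvLoopA xs (0, 0, 0, flag)).2.2.2) := by
  induction xs with
  | nil => intro c l m flag; simp [pvLoopA]
  | cons s rest ih =>
      intro c l m flag
      by_cases ho : PySem.Str.isIn "(" s <;>
        by_cases hc : PySem.Str.isIn ")" s <;>
        by_cases hm : PySem.Str.isIn "*" s <;>
        cases flag <;>
        simp only [pvLoopA, ho, hc, hm, if_true, if_false, ite_true, ite_false,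
          Bool.true_eq_false, Bool.false_eq_true, true_and, false_and, and_true, and_false, and_self] <;>
        (try conv_lhs => rw [ih]) <;>
        (try conv_rhs => rw [ih]) <;>
        simp only [Prod.mk.injEq, Bool.false_eq_true, if_false, ite_false, and_true, and_self] <;>
        refine ⟨by ring, by ring, by ring⟩

theorem pvLoop_eq (xs : List String) : ∀ (flag : Bool) (total : Int),
    pvLoopB xs (pvNc xs).tail flag total =
      total - (pvLoopA xs (0, 0, 0, flag)).1 - (pvLoopA xs (0, 0, 0, flag)).2.2.1
            + (pvLoopA xs (0, 0, 0, flag)).2.1 := by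
  induction xs with
  | nil => intro flag total; simp [pvLoopA, pvLoopB]
  | cons s rest ih =>
      intro flag total
      by_cases ho : PySem.Str.isIn "(" s <;>
        by_cases hc : PySem.Str.isIn ")" s <;>
        by_cases hm : PySem.Str.isIn "*" s <;>
        cases flag <;>
        simp only [pvLoopA, pvLoopB, pvNc, List.tail_cons, ho, hc, hm, if_true, if_false,
          ite_true, ite_false, Bool.true_eq_false, Bool.false_eq_true, true_and, false_and, and_true, and_false,
          and_self] <;>
        rw [ih] <;>
        (try conv_rhs => rw [pvLoopA_shift rest]) <;>
        (try rw [pvInnerA_eq_nc]) <;>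
        ring

-- ===== VERDICT (by name: the statement is the Claim_ definition above) =====
theorem count_for_len_val_spec : Claim_equal_count_for_len_val := by
  intro xs _
  unfold Spec_count_for_len_val count_for_len_val count_for_len_val_alt
  rw [pvLoop_eq xs false ((xs.length : Int) + 1)]
  obtain ⟨c, l, m, f⟩ := pvLoopA xs (0, 0, 0, false)
  simp only []
  ring
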